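-- pv_equiv track=rewrite | github.com/lminasiewicz/advent-of-code-2023 | day3/advent3_1.py | adjacent_symbols
-- ===== SOURCE A (Python) =====
-- def get_number(line: str, index: int) -> int | None:
--     result = ""
--     current = line[index]
--     if current.isnumeric():
--         result += current
--         while index + 1 < len(line):
--             index += 1
--             current = line[index]
--             if current.isnumeric():
--                 result += current
--             else:
--                 break
--         return int(result)
--
-- def symbol_is_valid(engine: list[str], lineindex: int, index: int) -> bool:
--     if not engine[lineindex][index].isnumeric() and not engine[lineindex][index] == ".":
--         return True
--     else: return False
--
-- def check_around(engine: list[str], lineindex: int, index: int) -> list[tuple[int, int]]: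
--     result = []
--     for i in range(lineindex - 1, lineindex + 2):
--         for j in range(index - 1, index + 2):
--             if i >= 0 and i < len(engine) and j >= 0 and j < len(engine[lineindex]):
--                 if symbol_is_valid(engine, i, j):
--                     result.append((i, j))
--     return result
--
-- def adjacent_symbols(engine: list[str], lineindex: int, index: int) -> int | None:
--     line = engine[lineindex]
--     number = get_number(line, index)
--     if number is not None:
--         symbols = []
--         for i in range(len(str(number))):
--             for coords in check_around(engine, lineindex, index + i):
--                 if coords not in symbols:
--                     symbols.append(coords)
--         return len(symbols)
-- ===== SOURCE B (Python) =====
-- def get_number(line: str, index: int) -> int | None: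
--     result = ""
--     current = line[index]
--     if current.isnumeric():
--         result += current
--         while index + 1 < len(line):
--             index += 1
--             current = line[index]
--             if current.isnumeric():
--                 result += current
--             else:
--                 break
--         return int(result)
--
--
-- def symbol_is_valid(engine: list[str], lineindex: int, index: int) -> bool:
--     if not engine[lineindex][index].isnumeric() and not engine[lineindex][index] == ".":
--         return True
--     else: return False
--
--
-- def adjacent_symbols(engine: list[str], lineindex: int, index: int) -> int | None:
--     line = engine[lineindex]
--     number = get_number(line, index)
--     if number is not None:
--         w = len(str(number))
--         count = 0
--         for i in range(lineindex - 1, lineindex + 2):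
--             for j in range(index - 1, index + w + 1):
--                 if 0 <= i < len(engine) and 0 <= j < len(line):
--                     if symbol_is_valid(engine, i, j):
--                         count += 1
--         return count
-- ===== Notes on version B (the rewrite author's own statement) =====
-- stated objective: simpler
-- what changed: Replaces A's per-digit 3x3 windows unioned through a dedup list (check_around plus 'coords not in symbols' scans) with a single bounds-checked sweep over the surrounding (lineindex-1..lineindex+1) x (index-1..index+w) rectangle that counts each neighbouring cell exactly once, so no dedup list is needed.
import Mathlib
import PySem

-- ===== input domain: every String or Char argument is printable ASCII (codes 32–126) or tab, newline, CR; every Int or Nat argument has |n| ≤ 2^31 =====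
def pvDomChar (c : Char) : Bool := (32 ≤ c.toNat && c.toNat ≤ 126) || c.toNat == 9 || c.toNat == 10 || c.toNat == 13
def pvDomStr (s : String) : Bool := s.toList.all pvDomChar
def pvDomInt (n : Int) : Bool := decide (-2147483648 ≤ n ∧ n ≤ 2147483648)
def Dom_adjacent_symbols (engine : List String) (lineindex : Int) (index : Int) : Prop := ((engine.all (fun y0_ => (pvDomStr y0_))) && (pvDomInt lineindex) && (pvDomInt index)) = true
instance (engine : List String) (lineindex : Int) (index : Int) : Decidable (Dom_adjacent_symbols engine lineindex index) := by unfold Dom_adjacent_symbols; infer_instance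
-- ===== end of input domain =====

-- B replaces A's dedup-list union of per-digit 3x3 windows with one bounds-checked sweep of the
-- surrounding rectangle that counts each neighbouring cell exactly once (objective: simpler).

-- ===== PORT A =====
-- get_number's while-loop; Python negative indices wrap, modelled by pyGet? (none = IndexError, excluded by Pre_).
def getNumberLoop (line : List Char) (index : Int) (result : List Char) : List Char :=
  if _h : index + 1 < (line.length : Int) then
    match PySem.List.pyGet? line (index + 1) with
    | none => result  -- IndexError (index + 1 < -len): excluded by Pre_
    | some c => if c.isDigit then getNumberLoop line (index + 1) (result ++ [c]) else result
  else result
termination_by ((line.length : Int) - index).toNat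
decreasing_by simp_wf; omega

-- str.isnumeric() agrees with Char.isDigit on the ASCII domain Dom_.
def getNumber (line : List Char) (index : Int) : Option Int :=
  match PySem.List.pyGet? line index with
  | none => none  -- line[index] IndexError: excluded by Pre_
  | some current =>
    if current.isDigit then
      some ((PySem.Int.ofChars? (getNumberLoop line index [current])).getD 0)  -- int(result); result is a nonempty digit string, so never none
    else none

def symbolIsValid (engine : List String) (lineindex : Int) (index : Int) : Bool :=
  match PySem.List.pyGet? engine lineindex with
  | none => false  -- IndexError: excluded by Pre_
  | some row =>
    match PySem.Str.pyGet? row index with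
    | none => false  -- IndexError: excluded by Pre_
    | some c => !c.isDigit && !(c == '.')

def checkAround (engine : List String) (lineindex : Int) (index : Int) : List (Int × Int) :=
  (PySem.List.pyRange (lineindex - 1) (lineindex + 2) 1).foldl (fun result i =>
    (PySem.List.pyRange (index - 1) (index + 2) 1).foldl (fun result j =>
      if 0 ≤ i ∧ i < (engine.length : Int) ∧ 0 ≤ j ∧ j < ((PySem.List.pyGetD engine lineindex "").toList.length : Int) then
        if symbolIsValid engine i j then result ++ [(i, j)] else result
      else result) result) []

def adjacent_symbols (engine : List String) (lineindex : Int) (index : Int) : Option Int :=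
  match PySem.List.pyGet? engine lineindex with
  | none => none  -- engine[lineindex] IndexError: excluded by Pre_
  | some line =>
    match getNumber line.toList index with
    | none => none
    | some number =>
      some (((PySem.List.pyRange 0 ((PySem.Int.toChars number).length : Int) 1).foldl
        (fun symbols i => (checkAround engine lineindex (index + i)).foldl
          (fun symbols coords => if coords ∈ symbols then symbols else symbols ++ [coords]) symbols) []).length : Int)

-- ===== PORT B =====
-- Source B keeps the module helpers get_number / symbol_is_valid unchanged, so its port reuses getNumber / symbolIsValid.
def adjacent_symbols_alt (engine : List String) (lineindex : Int) (index : Int) : Option Int :=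
  match PySem.List.pyGet? engine lineindex with
  | none => none  -- engine[lineindex] IndexError: excluded by Pre_
  | some line =>
    match getNumber line.toList index with
    | none => none
    | some number =>
      let w : Int := (PySem.Int.toChars number).length
      some ((PySem.List.pyRange (lineindex - 1) (lineindex + 2) 1).foldl (fun count i =>
        (PySem.List.pyRange (index - 1) (index + w + 1) 1).foldl (fun count j =>
          if 0 ≤ i ∧ i < (engine.length : Int) ∧ 0 ≤ j ∧ j < (line.toList.length : Int) then
            if symbolIsValid engine i j then count + 1 else count
          else count) count) 0)

-- ===== PRECONDITION & SPEC =====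
-- Pre_ admits exactly the inputs on which Python A returns (no IndexError): lineindex and index in
-- Python's (negative-wrapping) range, and, when a number starts at index, every neighbouring row
-- reached by the scan is long enough for every column the guard `j < len(engine[lineindex])` lets through.
-- The scanned digit span is described in closed form (drop/takeWhile), not by the port's recursion.
def Pre_adjacent_symbols (engine : List String) (lineindex : Int) (index : Int) : Prop :=
  ((decide (-(engine.length : Int) ≤ lineindex) && decide (lineindex < (engine.length : Int))) &&
   (match PySem.List.pyGet? engine lineindex with
    | none => false
    | some line =>
      let cs := line.toList
      let n : Int := cs.length
      (decide (-n ≤ index) && decide (index < n)) &&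
      (match PySem.List.pyGet? cs index with
       | none => false
       | some c =>
         !c.isDigit ||
         (let scanned := if 0 ≤ index then cs.drop index.toNat else cs.drop (n + index).toNat ++ cs
          let digits := scanned.takeWhile Char.isDigit
          let z := (digits.takeWhile (fun ch => ch == '0')).length
          let w : Int := if z = digits.length then 1 else (digits.length : Int) - z
          let jmax : Int := min (n - 1) (index + w)
          decide (jmax < max 0 (index - 1)) ||
          (List.range engine.length).all (fun r =>
            !(decide (lineindex - 1 ≤ (r : Int)) && decide ((r : Int) ≤ lineindex + 1)) ||
            decide (jmax < ((engine.getD r "").toList.length : Int))))))) = true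
instance (engine : List String) (lineindex : Int) (index : Int) : Decidable (Pre_adjacent_symbols engine lineindex index) := by unfold Pre_adjacent_symbols; infer_instance

def pvWitness_adjacent_symbols : List String × Int × Int := (["12", "*."], 0, 0)

def Spec_adjacent_symbols (engine : List String) (lineindex : Int) (index : Int) (out : Option Int) : Prop := out = adjacent_symbols_alt engine lineindex index
instance (engine : List String) (lineindex : Int) (index : Int) (out : Option Int) : Decidable (Spec_adjacent_symbols engine lineindex index out) := by unfold Spec_adjacent_symbols; infer_instance

-- ===== CLAIM (what is proved, stated in full; the proofs are below) =====
def Claim_equal_adjacent_symbols : Prop := ∀ (engine : List String) (lineindex : Int) (index : Int), Dom_adjacent_symbols engine lineindex index → Pre_adjacent_symbols engine lineindex index → Spec_adjacent_symbols engine lineindex index (adjacent_symbols engine lineindex index)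

-- ===== LEMMAS AND PROOFS =====

-- the combined cell predicate both loops test
def pvP (engine : List String) (n i j : Int) : Bool :=
  decide (0 ≤ i ∧ i < (engine.length : Int) ∧ 0 ≤ j ∧ j < n) && symbolIsValid engine i j

-- the rectangle B sweeps, as a list of cells
def pvR (engine : List String) (lineindex index n w : Int) : List (Int × Int) :=
  (PySem.List.pyRange (lineindex - 1) (lineindex + 2) 1).flatMap
    (fun i => ((PySem.List.pyRange (index - 1) (index + w + 1) 1).filter (fun j => pvP engine n i j)).map (fun j => (i, j)))

theorem pv_ite_norm (engine : List String) (n i j : Int) {γ : Type} (res add : γ) :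
    (if 0 ≤ i ∧ i < (engine.length : Int) ∧ 0 ≤ j ∧ j < n then
      if symbolIsValid engine i j then add else res
     else res) = (if pvP engine n i j then add else res) := by
  by_cases h : 0 ≤ i ∧ i < (engine.length : Int) ∧ 0 ≤ j ∧ j < n <;>
    cases hv : symbolIsValid engine i j <;> simp [pvP, h, hv]

theorem checkAround_eq (engine : List String) (lineindex c : Int) :
    checkAround engine lineindex c =
      (PySem.List.pyRange (lineindex - 1) (lineindex + 2) 1).flatMap
        (fun i => ((PySem.List.pyRange (c - 1) (c + 2) 1).filter
          (fun j => pvP engine ((PySem.List.pyGetD engine lineindex "").toList.length : Int) i j)).map (fun j => (i, j))) := by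
  unfold checkAround
  simp only [pv_ite_norm, PySem.List.foldl_append_if, PySem.List.foldl_append_eq_flatMap,
    List.nil_append]

theorem foldl_foldl_flatMap {σ α β : Type} (ts : List α) (g : α → List β) (f : σ → β → σ) (init : σ) :
    ts.foldl (fun s t => (g t).foldl f s) init = (ts.flatMap g).foldl f init := by
  induction ts generalizing init with
  | nil => rfl
  | cons t ts ih => simp [List.flatMap_cons, List.foldl_append, ih]

theorem mem_addFold (xs s : List (Int × Int)) (a : Int × Int) :
    a ∈ xs.foldl (fun s c => if c ∈ s then s else s ++ [c]) s ↔ a ∈ s ∨ a ∈ xs := by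
  induction xs generalizing s with
  | nil => simp
  | cons x xs ih =>
    simp only [List.foldl_cons]
    by_cases hx : x ∈ s
    · rw [if_pos hx, ih]
      constructor
      · rintro (h | h)
        · exact Or.inl h
        · exact Or.inr (List.mem_cons_of_mem _ h)
      · rintro (h | h)
        · exact Or.inl h
        · rcases List.mem_cons.mp h with h | h
          · exact Or.inl (h ▸ hx)
          · exact Or.inr h
    · rw [if_neg hx, ih]
      simp only [List.mem_append, List.mem_cons]
      tauto

theorem nodup_addFold (xs s : List (Int × Int)) (hs : s.Nodup) :
    (xs.foldl (fun s c => if c ∈ s then s else s ++ [c]) s).Nodup := by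
  induction xs generalizing s with
  | nil => exact hs
  | cons x xs ih =>
    simp only [List.foldl_cons]
    by_cases hx : x ∈ s
    · rw [if_pos hx]; exact ih s hs
    · rw [if_neg hx]
      apply ih
      rw [List.nodup_append]
      refine ⟨hs, List.nodup_singleton x, ?_⟩
      intro a ha b hb h
      rw [List.mem_singleton] at hb
      exact hx (hb ▸ h ▸ ha)

theorem foldl_add_count (rows : List Int) (h : Int → Nat) (acc : Int) :
    rows.foldl (fun c i => c + (h i : Int)) acc = acc + (((rows.map h).sum : Nat) : Int) := by
  induction rows generalizing acc with
  | nil => simp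
  | cons r rows ih => simp [ih]; ring

theorem nodup_flatMap_pairs (rows : List Int) (g : Int → List Int)
    (hrows : rows.Nodup) (hg : ∀ i, (g i).Nodup) :
    (rows.flatMap (fun i => (g i).map (fun j => (i, j)))).Nodup := by
  induction rows with
  | nil => simp
  | cons r rows ih =>
    rw [List.flatMap_cons, List.nodup_append]
    refine ⟨List.Nodup.map (fun a b hab => by simpa using hab) (hg r),
      ih (List.nodup_cons.mp hrows).2, ?_⟩
    intro a ha b hb heq
    simp only [List.mem_map] at ha
    obtain ⟨j, _, rfl⟩ := ha
    simp only [List.mem_flatMap, List.mem_map] at hb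
    obtain ⟨i, hi, j', _, rfl⟩ := hb
    injection heq with h1 _
    cases h1
    exact (List.nodup_cons.mp hrows).1 hi

theorem nodup_pvR (engine : List String) (lineindex index n w : Int) :
    (pvR engine lineindex index n w).Nodup :=
  nodup_flatMap_pairs _ _ (PySem.List.nodup_pyRange_one _ _)
    (fun _ => List.Nodup.filter _ (PySem.List.nodup_pyRange_one _ _))

theorem mem_pvR (engine : List String) (lineindex index n w : Int) (a : Int × Int) :
    a ∈ pvR engine lineindex index n w ↔
      (lineindex - 1 ≤ a.1 ∧ a.1 < lineindex + 2 ∧ index - 1 ≤ a.2 ∧ a.2 < index + w + 1 ∧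
        pvP engine n a.1 a.2 = true) := by
  obtain ⟨a1, a2⟩ := a
  simp only [pvR, List.mem_flatMap, List.mem_map, List.mem_filter, PySem.List.mem_pyRange_one,
    Prod.mk.injEq]
  constructor
  · rintro ⟨i, hi, j, ⟨hj, hp⟩, rfl, rfl⟩
    exact ⟨hi.1, hi.2, hj.1, hj.2, hp⟩
  · rintro ⟨h1, h2, h3, h4, hp⟩
    exact ⟨a1, ⟨h1, h2⟩, a2, ⟨⟨h3, h4⟩, hp⟩, rfl, rfl⟩

theorem toChars_length_pos (m : Int) : 1 ≤ ((PySem.Int.toChars m).length : Int) := by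
  have h1 := @Nat.length_toDigits_pos 10 m.natAbs
  have h2 := @Nat.length_toDigits_pos 10 m.toNat
  unfold PySem.Int.toChars
  split <;> simp <;> omega

-- the heart: A's dedup union of the w per-digit 3x3 windows is a permutation of B's rectangle
theorem symbols_perm (engine : List String) (lineindex index n w : Int) (hw : 1 ≤ w)
    (hn : ((PySem.List.pyGetD engine lineindex "").toList.length : Int) = n) :
    ((PySem.List.pyRange 0 w 1).foldl
        (fun symbols i => (checkAround engine lineindex (index + i)).foldl
          (fun symbols coords => if coords ∈ symbols then symbols else symbols ++ [coords]) symbols) []).Perm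
      (pvR engine lineindex index n w) := by
  rw [foldl_foldl_flatMap]
  rw [List.perm_ext_iff_of_nodup (nodup_addFold _ _ (by simp)) (nodup_pvR _ _ _ _ _)]
  intro a
  rw [mem_addFold, mem_pvR]
  simp only [List.not_mem_nil, false_or, List.mem_flatMap]
  constructor
  · rintro ⟨t, ht, ha⟩
    rw [PySem.List.mem_pyRange_one] at ht
    rw [checkAround_eq, hn] at ha
    obtain ⟨a1, a2⟩ := a
    simp only [List.mem_flatMap, List.mem_map, List.mem_filter, PySem.List.mem_pyRange_one,
      Prod.mk.injEq] at ha
    obtain ⟨i, hi, j, ⟨hj, hp⟩, rfl, rfl⟩ := ha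
    exact ⟨hi.1, hi.2, by omega, by omega, hp⟩
  · rintro ⟨h1, h2, h3, h4, hp⟩
    obtain ⟨a1, a2⟩ := a
    refine ⟨max 0 (min (w - 1) (a2 - index)), ?_, ?_⟩
    · rw [PySem.List.mem_pyRange_one]; omega
    · rw [checkAround_eq, hn]
      simp only [List.mem_flatMap, List.mem_map, List.mem_filter, PySem.List.mem_pyRange_one,
        Prod.mk.injEq]
      exact ⟨a1, ⟨h1, h2⟩, a2, ⟨⟨by omega, by omega⟩, hp⟩, rfl, rfl⟩

-- B's double counting loop counts exactly the cells of the rectangle pvR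
theorem count_eq (engine : List String) (lineindex index n w : Int) :
    (PySem.List.pyRange (lineindex - 1) (lineindex + 2) 1).foldl (fun count i =>
        (PySem.List.pyRange (index - 1) (index + w + 1) 1).foldl (fun count j =>
          if 0 ≤ i ∧ i < (engine.length : Int) ∧ 0 ≤ j ∧ j < n then
            if symbolIsValid engine i j then count + 1 else count
          else count) count) 0
      = ((pvR engine lineindex index n w).length : Int) := by
  simp only [pv_ite_norm, PySem.List.foldl_if_add_one]
  rw [foldl_add_count]
  simp [pvR, List.length_flatMap, List.countP_eq_length_filter]

theorem ports_eq (engine : List String) (lineindex index : Int) :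
    adjacent_symbols engine lineindex index = adjacent_symbols_alt engine lineindex index := by
  unfold adjacent_symbols adjacent_symbols_alt
  cases hL : PySem.List.pyGet? engine lineindex with
  | none => rfl
  | some line =>
    cases hN : getNumber line.toList index with
    | none => simp [hN]
    | some number =>
      simp only [hN]
      have hgd : PySem.List.pyGetD engine lineindex "" = line := by
        simp [PySem.List.pyGetD, hL]
      have hn : ((PySem.List.pyGetD engine lineindex "").toList.length : Int)
          = (line.toList.length : Int) := by rw [hgd]
      have hperm := symbols_perm engine lineindex index (line.toList.length : Int)
        ((PySem.Int.toChars number).length : Int) (toChars_length_pos number) hn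
      rw [hperm.length_eq, count_eq]

-- ===== VERDICT (by name: the statement is the Claim_ definition above) =====
theorem adjacent_symbols_spec : Claim_equal_adjacent_symbols := by
  intro engine lineindex index _ _
  unfold Spec_adjacent_symbols
  exact ports_eq engine lineindex index
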